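-- pv_equiv track=rewrite | github.com/abhijeets54/GlobalConnect | backend/app.py | embedding
-- ===== SOURCE A (Python) =====
-- def embedding(arr, peak, data):
--     ind = 0
--     for i in range(len(arr)):
--         if ind == len(data):
--             break
--         for j in range(len(arr[0])):
--             if arr[i][j] == peak:
--                 if data[ind] == '1':
--                     arr[i][j] += 1
--                     ind += 1
--                     if ind == len(data):
--                         break
--                 else:
--                     ind += 1
--                     if ind == len(data):
--                         break
--     return arr
-- ===== SOURCE B (Python) =====
-- def embedding(arr, peak, data):
--     # Phase 1: collect peak-cell coordinates in row-major order (column range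
--     # taken from the first row, as the original does).
--     cols = len(arr[0]) if arr else 0
--     coords = [(i, j) for i in range(len(arr)) for j in range(cols)
--               if arr[i][j] == peak]
--     # Phase 2: consume one bit per peak cell; '1' bits increment the cell.
--     for (i, j), bit in zip(coords, data):
--         if bit == '1':
--             arr[i][j] += 1
--     return arr
-- ===== Notes on version B (the rewrite author's own statement) =====
-- stated objective: simpler
-- what changed: A interleaves scanning and bit consumption in nested loops with break/ind bookkeeping; B first builds the row-major list of peak-cell coordinates, then zips it with the data bits in a separate pass.
-- outside the precondition, e.g. on embedding([[1, 2], [3]], 1, '1'): A returns [[2, 2], [3]], B raises IndexError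
import Mathlib
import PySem

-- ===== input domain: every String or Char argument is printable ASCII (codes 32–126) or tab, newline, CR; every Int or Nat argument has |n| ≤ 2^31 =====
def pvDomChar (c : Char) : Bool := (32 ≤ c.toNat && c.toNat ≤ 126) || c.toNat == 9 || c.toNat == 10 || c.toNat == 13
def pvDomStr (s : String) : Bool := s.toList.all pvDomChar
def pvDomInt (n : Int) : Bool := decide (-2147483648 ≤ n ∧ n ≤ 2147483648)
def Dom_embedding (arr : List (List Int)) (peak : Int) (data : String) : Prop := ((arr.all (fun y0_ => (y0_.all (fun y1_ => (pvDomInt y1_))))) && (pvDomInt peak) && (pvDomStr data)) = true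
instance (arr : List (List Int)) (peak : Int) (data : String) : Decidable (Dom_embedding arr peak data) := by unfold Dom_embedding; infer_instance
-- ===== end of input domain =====

-- B replaces A's interleaved find-and-consume nested loops by a coordinate-collection
-- pass followed by a zip-with-data assignment pass (objective: simpler).
-- Both Pythons mutate arr in place; the equivalence proved here is about the return value.

-- shared indexing helpers (in-range under Pre_; where Python would raise IndexError the
-- input is excluded by Pre_, so the getD defaults are never the value read)
-- arr[i][j]
def pvRead (a : List (List Int)) (i j : Nat) : Int := (a.getD i []).getD j 0
-- arr[i][j] += 1
def pvBump (a : List (List Int)) (i j : Nat) : List (List Int) :=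
  a.modify i (fun row => row.modify j (· + 1))

-- ===== PORT A =====

-- inner loop "for j in range(len(arr[0]))" with its two break points; state (arr, ind)
def pvInnerA (peak : Int) (data : List Char) (i : Nat) :
    List Nat → List (List Int) × Nat → List (List Int) × Nat
  | [], st => st
  | j :: js, (a, ind) =>
    if pvRead a i j = peak then
      if data.getD ind ' ' = '1' then
        let a' := pvBump a i j
        if ind + 1 = data.length then (a', ind + 1)
        else pvInnerA peak data i js (a', ind + 1)
      else
        if ind + 1 = data.length then (a, ind + 1)
        else pvInnerA peak data i js (a, ind + 1)
    else pvInnerA peak data i js (a, ind)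

-- outer loop "for i in range(len(arr))" with the "if ind == len(data): break" check
def pvOuterA (peak : Int) (data : List Char) :
    List Nat → List (List Int) × Nat → List (List Int)
  | [], (a, _) => a
  | i :: is, (a, ind) =>
    if ind = data.length then a
    else pvOuterA peak data is (pvInnerA peak data i (List.range ((a.getD 0 []).length)) (a, ind))

def embedding (arr : List (List Int)) (peak : Int) (data : String) : List (List Int) :=
  pvOuterA peak data.toList (List.range arr.length) (arr, 0)

-- ===== PORT B =====

def embedding_alt (arr : List (List Int)) (peak : Int) (data : String) : List (List Int) :=
  let cols : Nat := match arr with | [] => 0 | r :: _ => r.length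
  let coords : List (Nat × Nat) :=
    (List.range arr.length).flatMap (fun i =>
      (List.range cols).filterMap (fun j =>
        if pvRead arr i j = peak then some (i, j) else none))
  (coords.zip data.toList).foldl
    (fun a p => if p.2 = '1' then pvBump a p.1.1 p.1.2 else a) arr

-- ===== PRECONDITION & SPEC =====
-- Pre_ excludes ragged arrays in which some row is shorter than the first row: there
-- Python A indexes arr[i][j] past a row's end and raises IndexError (B likewise raises
-- while building its coordinate list, even when A's early break happens to return first).
def Pre_embedding (arr : List (List Int)) (peak : Int) (data : String) : Prop :=
  ∀ row ∈ arr, (arr.headD []).length ≤ row.length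
instance (arr : List (List Int)) (peak : Int) (data : String) : Decidable (Pre_embedding arr peak data) := by unfold Pre_embedding; infer_instance

def pvWitness_embedding : List (List Int) × Int × String := ([[1, 2], [3, 1]], 1, "101")

def Spec_embedding (arr : List (List Int)) (peak : Int) (data : String) (out : List (List Int)) : Prop := out = embedding_alt arr peak data
instance (arr : List (List Int)) (peak : Int) (data : String) (out : List (List Int)) : Decidable (Spec_embedding arr peak data out) := by unfold Spec_embedding; infer_instance

-- ===== CLAIM (what is proved, stated in full; the proofs are below) =====
def Claim_equal_embedding : Prop := ∀ (arr : List (List Int)) (peak : Int) (data : String), Dom_embedding arr peak data → Pre_embedding arr peak data → Spec_embedding arr peak data (embedding arr peak data)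

-- ===== LEMMAS AND PROOFS =====

-- common characterization: consume one bit per coordinate, '1' bits bump the cell
def pvApplyBits : List (Nat × Nat) → List Char → List (List Int) → List (List Int)
  | [], _, a => a
  | _ :: _, [], a => a
  | (i, j) :: cs, b :: bs, a => pvApplyBits cs bs (if b = '1' then pvBump a i j else a)

def pvRowCoords (orig : List (List Int)) (peak : Int) (cols i : Nat) : List (Nat × Nat) :=
  (List.range cols).filterMap (fun j => if pvRead orig i j = peak then some (i, j) else none)

theorem pvApplyBits_nilBits (cs : List (Nat × Nat)) (a : List (List Int)) :
    pvApplyBits cs [] a = a := by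
  cases cs with
  | nil => rfl
  | cons c cs => cases c; rfl

theorem pvZip_foldl (cs : List (Nat × Nat)) (bs : List Char) (a : List (List Int)) :
    (cs.zip bs).foldl (fun a p => if p.2 = '1' then pvBump a p.1.1 p.1.2 else a) a
      = pvApplyBits cs bs a := by
  induction cs generalizing bs a with
  | nil => simp [pvApplyBits]
  | cons c cs ih =>
    cases bs with
    | nil => cases c; simp [pvApplyBits_nilBits]
    | cons b bs =>
      cases c
      rw [List.zip_cons_cons, List.foldl_cons]
      simp only [pvApplyBits]
      exact ih bs _

theorem pvApplyBits_append (c1 c2 : List (Nat × Nat)) (bs : List Char) (a : List (List Int)) :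
    pvApplyBits (c1 ++ c2) bs a = pvApplyBits c2 (bs.drop c1.length) (pvApplyBits c1 bs a) := by
  induction c1 generalizing bs a with
  | nil => simp [pvApplyBits]
  | cons c c1 ih =>
    cases bs with
    | nil => cases c; simp [pvApplyBits_nilBits, pvApplyBits]
    | cons b bs => cases c; simp only [List.cons_append, pvApplyBits, List.length_cons,
        List.drop_succ_cons]; exact ih bs _

theorem pvRead_bump (a : List (List Int)) (i j i' j' : Nat) (h : (i, j) ≠ (i', j')) :
    pvRead (pvBump a i j) i' j' = pvRead a i' j' := by
  unfold pvRead pvBump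
  rcases eq_or_ne i i' with rfl | hi
  · have hj : j ≠ j' := by intro hj; exact h (by rw [hj])
    simp only [List.getD_eq_getElem?_getD, List.getElem?_modify]
    cases a[i]? with
    | none => rfl
    | some row =>
      simp [List.getD_eq_getElem?_getD, hj]
  · simp [List.getD_eq_getElem?_getD, List.getElem?_modify, hi]

theorem pvRowlen_bump (a : List (List Int)) (i j r : Nat) :
    ((pvBump a i j).getD r []).length = ((a.getD r []).length) := by
  unfold pvBump
  rcases eq_or_ne i r with rfl | hi
  · simp only [List.getD_eq_getElem?_getD, List.getElem?_modify]
    cases a[i]? with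
    | none => rfl
    | some row => simp
  · simp [List.getD_eq_getElem?_getD, List.getElem?_modify, hi]

theorem pvInnerA_rowlen (peak : Int) (data : List Char) (i : Nat) (js : List Nat)
    (a : List (List Int)) (ind r : Nat) :
    (((pvInnerA peak data i js (a, ind)).1).getD r []).length = ((a.getD r []).length) := by
  induction js generalizing a ind with
  | nil => rfl
  | cons j js ih =>
    simp only [pvInnerA]
    split_ifs with h1 h2 h3 h4
    · exact pvRowlen_bump a i j r
    · rw [ih]; exact pvRowlen_bump a i j r
    · rfl
    · rw [ih]
    · rw [ih]

theorem pvInnerA_read_other (peak : Int) (data : List Char) (i : Nat) (js : List Nat)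
    (a : List (List Int)) (ind : Nat) (i' j' : Nat) (h : i' ≠ i) :
    pvRead ((pvInnerA peak data i js (a, ind)).1) i' j' = pvRead a i' j' := by
  induction js generalizing a ind with
  | nil => rfl
  | cons j js ih =>
    simp only [pvInnerA]
    split_ifs with h1 h2 h3 h4
    · exact pvRead_bump a i j i' j' (by simp [h.symm])
    · rw [ih]; exact pvRead_bump a i j i' j' (by simp [h.symm])
    · rfl
    · rw [ih]
    · rw [ih]

theorem pvRowCoords_length (orig : List (List Int)) (peak : Int) (cols i : Nat) :
    (pvRowCoords orig peak cols i).length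
      = (List.range cols).countP (fun j => pvRead orig i j = peak) := by
  unfold pvRowCoords
  induction List.range cols with
  | nil => rfl
  | cons j js ih =>
    by_cases h : pvRead orig i j = peak
    · simp [h, ih]
    · simp [h, ih]

theorem pvDrop_min (data : List Char) (m : Nat) :
    data.drop (min data.length m) = data.drop m := by
  by_cases h : m ≤ data.length
  · rw [Nat.min_eq_right h]
  · rw [Nat.min_eq_left (by omega)]
    have h1 : data.drop data.length = [] := List.drop_length
    have h2 : data.drop m = [] := List.drop_eq_nil_of_le (by omega)
    rw [h1, h2]

-- the inner loop = pvApplyBits on this row's peak coordinates (computed on the original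
-- array), consuming data from position ind; requires the row's cells still original
theorem pvInnerA_eq (peak : Int) (data : List Char) (orig : List (List Int)) (i : Nat)
    (js : List Nat) (a : List (List Int)) (ind : Nat)
    (hind : ind < data.length) (hnd : js.Nodup)
    (hag : ∀ j ∈ js, pvRead a i j = pvRead orig i j) :
    pvInnerA peak data i js (a, ind) =
      (pvApplyBits (js.filterMap (fun j => if pvRead orig i j = peak then some (i, j) else none))
         (data.drop ind) a,
       min data.length (ind + js.countP (fun j => pvRead orig i j = peak))) := by
  induction js generalizing a ind with
  | nil =>
    simp only [pvInnerA, List.filterMap_nil, List.countP_nil, Nat.add_zero, pvApplyBits]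
    rw [Nat.min_eq_right (Nat.le_of_lt hind)]
  | cons j js ih =>
    have hja : pvRead a i j = pvRead orig i j := hag j (by simp)
    have hgetd : data.getD ind ' ' = data[ind] := by
      rw [List.getD_eq_getElem?_getD, List.getElem?_eq_getElem hind]; rfl
    have hdrop : data.drop ind = data.getD ind ' ' :: data.drop (ind + 1) := by
      rw [hgetd]; exact List.drop_eq_getElem_cons hind
    have hnd' : js.Nodup := (List.nodup_cons.mp hnd).2
    have hjnot : j ∉ js := (List.nodup_cons.mp hnd).1
    simp only [pvInnerA, List.filterMap_cons, List.countP_cons]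
    by_cases h1 : pvRead a i j = peak
    · have horig : pvRead orig i j = peak := hja ▸ h1
      rw [if_pos h1, if_pos horig]
      by_cases h2 : data.getD ind ' ' = '1'
      · rw [if_pos h2]
        by_cases h3 : ind + 1 = data.length
        · rw [if_pos h3, Prod.mk.injEq]
          constructor
          · rw [hdrop]
            simp only [pvApplyBits]
            rw [if_pos h2, h3, List.drop_length, pvApplyBits_nilBits]
          · simp only [horig, decide_true, if_pos]
            omega
        · rw [if_neg h3]
          have hag' : ∀ j' ∈ js, pvRead (pvBump a i j) i j' = pvRead orig i j' := by
            intro j' hj'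
            rw [pvRead_bump a i j i j' (by simp; intro hjj; exact hjnot (hjj ▸ hj'))]
            exact hag j' (by simp [hj'])
          rw [ih (pvBump a i j) (ind + 1) (by omega) hnd' hag', Prod.mk.injEq]
          constructor
          · rw [hdrop]
            simp only [pvApplyBits]
            rw [if_pos h2]
          · simp only [horig, decide_true, if_pos]
            omega
      · rw [if_neg h2]
        by_cases h3 : ind + 1 = data.length
        · rw [if_pos h3, Prod.mk.injEq]
          constructor
          · rw [hdrop]
            simp only [pvApplyBits]
            rw [if_neg h2, h3, List.drop_length, pvApplyBits_nilBits]
          · simp only [horig, decide_true, if_pos]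
            omega
        · rw [if_neg h3]
          have hag' : ∀ j' ∈ js, pvRead a i j' = pvRead orig i j' :=
            fun j' hj' => hag j' (by simp [hj'])
          rw [ih a (ind + 1) (by omega) hnd' hag', Prod.mk.injEq]
          constructor
          · rw [hdrop]
            simp only [pvApplyBits]
            rw [if_neg h2]
          · simp only [horig, decide_true, if_pos]
            omega
    · have horig : ¬ pvRead orig i j = peak := fun hc => h1 (hja.trans hc)
      rw [if_neg h1, if_neg horig]
      rw [ih a ind hind hnd' (fun j' hj' => hag j' (by simp [hj']))]
      simp only [horig, decide_false, Bool.false_eq_true, if_false, Nat.add_zero]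

-- the outer loop = pvApplyBits on the concatenated per-row peak coordinates
theorem pvOuterA_eq (peak : Int) (data : List Char) (orig : List (List Int)) (cols : Nat)
    (rows : List Nat) (a : List (List Int)) (ind : Nat)
    (hnd : rows.Nodup) (hind : ind ≤ data.length)
    (hag : ∀ i ∈ rows, ∀ j, pvRead a i j = pvRead orig i j)
    (hcols : (a.getD 0 []).length = cols) :
    pvOuterA peak data rows (a, ind)
      = pvApplyBits (rows.flatMap (pvRowCoords orig peak cols)) (data.drop ind) a := by
  induction rows generalizing a ind with
  | nil => simp [pvOuterA, pvApplyBits]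
  | cons i rows ih =>
    simp only [pvOuterA, List.flatMap_cons]
    by_cases h0 : ind = data.length
    · rw [if_pos h0, h0, List.drop_length, pvApplyBits_nilBits]
    · rw [if_neg h0]
      have hind' : ind < data.length := lt_of_le_of_ne hind h0
      have hin := pvInnerA_eq peak data orig i (List.range cols) a ind hind'
        List.nodup_range (fun j _ => hag i (by simp) j)
      rw [hcols, hin]
      have hc1 : (List.range cols).filterMap
          (fun j => if pvRead orig i j = peak then some (i, j) else none)
            = pvRowCoords orig peak cols i := rfl
      rw [hc1]
      have hread' : ∀ i' ∈ rows, ∀ j, pvRead (pvApplyBits (pvRowCoords orig peak cols i) (data.drop ind) a) i' j = pvRead orig i' j := by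
        intro i' hi' j
        have hne : i' ≠ i := fun hc => (List.nodup_cons.mp hnd).1 (hc ▸ hi')
        have hstep : pvRead (pvApplyBits (pvRowCoords orig peak cols i) (data.drop ind) a) i' j = pvRead a i' j := by
          rw [← hc1]
          have := pvInnerA_read_other peak data i (List.range cols) a ind i' j hne
          rw [hin] at this
          exact this
        rw [hstep]; exact hag i' (by simp [hi']) j
      have hcols' : ((pvApplyBits (pvRowCoords orig peak cols i) (data.drop ind) a).getD 0 []).length = cols := by
        rw [← hc1]
        have := pvInnerA_rowlen peak data i (List.range cols) a ind 0
        rw [hin] at this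
        rw [this]; exact hcols
      rw [ih _ (min data.length (ind + (List.range cols).countP (fun j => pvRead orig i j = peak)))
           (List.nodup_cons.mp hnd).2 (Nat.min_le_left _ _) hread' hcols']
      rw [pvDrop_min, pvApplyBits_append]
      congr 1
      rw [List.drop_drop, pvRowCoords_length]

theorem pvCols_eq (arr : List (List Int)) :
    (arr.getD 0 []).length = (match arr with | [] => 0 | r :: _ => r.length) := by
  cases arr <;> rfl

-- ===== VERDICT (by name: the statement is the Claim_ definition above) =====
theorem embedding_spec : Claim_equal_embedding := by
  intro arr peak data hD hP
  simp only [Spec_embedding, embedding, embedding_alt]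
  rw [pvZip_foldl, ← pvCols_eq arr]
  rw [pvOuterA_eq peak data.toList arr ((arr.getD 0 []).length)
      (List.range arr.length) arr 0 List.nodup_range (Nat.zero_le _)
      (fun _ _ _ => rfl) rfl]
  rw [List.drop_zero]
  rfl
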